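-- pv_equiv track=rewrite | github.com/kh277/BOJ | 백준/Gold/32347. 시간을 돌리고 싶어/시간을 돌리고 싶어.py | solve
-- ===== SOURCE A (Python) =====
-- def check(T, K, gap):
--     acc = 0
--     for i in range(len(gap)):
--         if acc + gap[i] <= T:
--             acc += gap[i]
--         else:
--             if gap[i] > T:
--                 return False
--             acc = gap[i]
--             K -= 1
--
--     if K >= 1:
--         return True
--     return False
--
-- def solve(N, K, A):
--     A[N-1] = 1
--
--     # 타임머신을 켜둔 간격 계산
--     gap = []
--     prev = 0
--     for i in range(1, N):
--         if A[i] == 1: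
--             gap.append(i-prev)
--             prev = i
--
--     # 이분 탐색으로 T의 최소값 찾기
--     start = 0
--     end = N-1
--     while start < end:
--         mid = (start+end)//2
--         if check(mid, K, gap) == False:
--             start = mid+1
--         else:
--             end = mid
--
--     return start
-- ===== SOURCE B (Python) =====
-- def solve(N, K, A):
--     # Same mutation of A as the original (observable side effect kept).
--     A[N-1] = 1
--
--     # gap construction kept from the original task statement
--     gap = []
--     prev = 0
--     for i in range(1, N):
--         if A[i] == 1:
--             gap.append(i - prev)
--             prev = i
--
--     if not gap:
--         return 0
--
--     # prefix sums of gap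
--     pre = [0]
--     for g in gap:
--         pre.append(pre[-1] + g)
--
--     # dp[j] = minimal achievable maximum segment sum for gap[:j+1]
--     # using at most s contiguous segments; start with s = 1.
--     dp = pre[1:]
--     for _ in range(1, min(K, len(gap))):
--         new = []
--         for j in range(len(gap)):
--             best = dp[j]
--             for t in range(j):
--                 cand = max(dp[t], pre[j + 1] - pre[t + 1])
--                 if cand < best:
--                     best = cand
--             new.append(best)
--         dp = new
--     return dp[-1]
-- ===== Notes on version B (the rewrite author's own statement) =====
-- stated objective: alternative
-- what changed: A probes candidate answers T by binary search, re-running a greedy feasibility check for each probe; B keeps the same gap construction but computes the answer directly as a minimax-partition dynamic program (dp over split points with prefix sums, at most min(K, len(gap)) segments), with no search over T and no greedy check.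
import Mathlib
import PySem

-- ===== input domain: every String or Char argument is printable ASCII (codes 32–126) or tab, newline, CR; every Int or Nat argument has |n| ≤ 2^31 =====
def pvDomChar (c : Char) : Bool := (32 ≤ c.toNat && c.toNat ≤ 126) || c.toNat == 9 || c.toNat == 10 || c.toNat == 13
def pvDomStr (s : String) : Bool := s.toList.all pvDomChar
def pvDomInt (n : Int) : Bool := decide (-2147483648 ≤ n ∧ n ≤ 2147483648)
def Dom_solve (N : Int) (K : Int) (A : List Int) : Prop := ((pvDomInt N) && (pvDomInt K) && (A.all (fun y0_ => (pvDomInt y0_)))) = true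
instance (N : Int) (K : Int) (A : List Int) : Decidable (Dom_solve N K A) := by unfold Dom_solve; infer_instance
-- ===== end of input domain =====

-- B replaces A's binary search over T (with a greedy feasibility check) by a direct
-- dynamic program for the minimax partition of the gap array into at most K contiguous
-- segments; equal return value on all admitted inputs (A mutates A[N-1] in place and B
-- performs the same mutation in Python; the equivalence proved here is about the return value).

-- ===== PORT A =====
-- shared helper: the gap-construction loop, literally identical lines in Source A and Source B
-- (A[N-1] = 1, then for i in range(1, N): if A[i] == 1: gap.append(i - prev); prev = i)
def gapStep (A' : List Int) (s : List Int × Int) (i : Int) : List Int × Int :=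
  if PySem.List.pyGetD A' i 0 == 1 then (s.1 ++ [i - s.2], i) else s

def gapsOf (N : Int) (A : List Int) : List Int :=
  ((PySem.List.pyRange 1 N 1).foldl (gapStep (PySem.List.pySetD A (N-1) 1)) ([], 0)).1

-- check(T, K, gap): the for-loop over gap with accumulators acc and K, early return False
def checkGo (T : Int) (K : Int) (acc : Int) : List Int → Bool
  | [] => decide (1 ≤ K)
  | g :: rest =>
    if acc + g ≤ T then checkGo T K (acc + g) rest
    else if T < g then false
    else checkGo T (K - 1) g rest

def checkA (T : Int) (K : Int) (gap : List Int) : Bool := checkGo T K 0 gap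

-- the while start < end binary-search loop
def bsA (K : Int) (gap : List Int) (start e : Int) : Int :=
  if _h : start < e then
    -- mid = (start + end) // 2, inlined
    if checkA (PySem.Int.floordiv (start + e) 2) K gap = false then
      bsA K gap (PySem.Int.floordiv (start + e) 2 + 1) e
    else bsA K gap start (PySem.Int.floordiv (start + e) 2)
  else start
termination_by (e - start).toNat
decreasing_by
  · have h2 := PySem.Int.floordiv_mul_add_mod (start + e) 2
    have h3 := PySem.Int.mod_nonneg (start + e) (b := 2) (by omega)
    have h4 := PySem.Int.mod_lt (start + e) (b := 2) (by omega)
    omega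
  · have h2 := PySem.Int.floordiv_mul_add_mod (start + e) 2
    have h3 := PySem.Int.mod_nonneg (start + e) (b := 2) (by omega)
    have h4 := PySem.Int.mod_lt (start + e) (b := 2) (by omega)
    omega

def solve (N : Int) (K : Int) (A : List Int) : Int :=
  bsA K (gapsOf N A) 0 (N - 1)

-- ===== PORT B =====
-- one DP layer: new[j] = min(dp[j], min over t < j of max(dp[t], pre[j+1] - pre[t+1]))
def layerB (dp gap pre : List Int) : List Int :=
  (PySem.List.pyRange 0 (gap.length : Int) 1).foldl (fun new j =>
    new ++ [(PySem.List.pyRange 0 j 1).foldl (fun best t =>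
      let cand := max (PySem.List.pyGetD dp t 0)
        (PySem.List.pyGetD pre (j + 1) 0 - PySem.List.pyGetD pre (t + 1) 0)
      if cand < best then cand else best) (PySem.List.pyGetD dp j 0)]) []

def solve_alt (N : Int) (K : Int) (A : List Int) : Int :=
  let gap := gapsOf N A
  if gap = [] then 0
  else
    let pre := gap.foldl (fun p g => p ++ [PySem.List.pyGetD p (-1) 0 + g]) [0]
    let dp0 := PySem.List.slice pre (some 1) none
    let dp := (PySem.List.pyRange 1 (min K (gap.length : Int)) 1).foldl
      (fun dp _ => layerB dp gap pre) dp0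
    PySem.List.pyGetD dp (-1) 0

-- ===== PRECONDITION & SPEC =====
-- Pre_ excludes exactly the inputs where the assignment A[N-1] = 1 raises IndexError
-- (index N-1 out of range for A, including A = []).
def Pre_solve (N : Int) (K : Int) (A : List Int) : Prop :=
  PySem.Raise.InRange A.length (N - 1)
instance (N : Int) (K : Int) (A : List Int) : Decidable (Pre_solve N K A) := by
  unfold Pre_solve; infer_instance

def pvWitness_solve : Int × Int × List Int := (3, 2, [0, 1, 1])

def Spec_solve (N : Int) (K : Int) (A : List Int) (out : Int) : Prop := out = solve_alt N K A
instance (N : Int) (K : Int) (A : List Int) (out : Int) : Decidable (Spec_solve N K A out) := by unfold Spec_solve; infer_instance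

-- ===== CLAIM (what is proved, stated in full; the proofs are below) =====
def Claim_equal_solve : Prop := ∀ (N : Int) (K : Int) (A : List Int), Dom_solve N K A → Pre_solve N K A → Spec_solve N K A (solve N K A)

-- ===== LEMMAS AND PROOFS =====

-- ---------- partitions into contiguous segments ----------

def PartOK (T : Int) (P : List (List Int)) : Prop := ∀ p ∈ P, p ≠ [] ∧ p.sum ≤ T

def FeasN (T : Int) (s : Nat) (l : List Int) : Prop :=
  ∃ P : List (List Int), P.flatten = l ∧ PartOK T P ∧ P.length ≤ s

def Feas (T K : Int) (l : List Int) : Prop :=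
  ∃ P : List (List Int), P.flatten = l ∧ PartOK T P ∧ (P.length : Int) ≤ K

theorem FeasN_mono_val {T T' : Int} {s : Nat} {l : List Int} (h : T ≤ T')
    (hf : FeasN T s l) : FeasN T' s l := by
  obtain ⟨P, h1, h2, h3⟩ := hf
  exact ⟨P, h1, fun p hp => ⟨(h2 p hp).1, le_trans (h2 p hp).2 h⟩, h3⟩

theorem FeasN_mono_s {T : Int} {s s' : Nat} {l : List Int} (h : s ≤ s')
    (hf : FeasN T s l) : FeasN T s' l := by
  obtain ⟨P, h1, h2, h3⟩ := hf
  exact ⟨P, h1, h2, le_trans h3 h⟩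

theorem parts_length_le {T : Int} {P : List (List Int)} (h : PartOK T P) :
    P.length ≤ P.flatten.length := by
  induction P with
  | nil => simp
  | cons p P ih =>
    have hp := h p (by simp)
    have hrest : PartOK T P := fun q hq => h q (by simp [hq])
    have := ih hrest
    have : 1 ≤ p.length := List.length_pos_iff.mpr hp.1
    simp only [List.flatten_cons, List.length_cons, List.length_append]
    omega

theorem Feas_iff_FeasN {T K : Int} {l : List Int} (hK : 1 ≤ K) :
    Feas T K l ↔ FeasN T (min K (l.length : Int)).toNat l := by
  constructor
  · rintro ⟨P, h1, h2, h3⟩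
    refine ⟨P, h1, h2, ?_⟩
    have := parts_length_le h2
    rw [h1] at this
    omega
  · rintro ⟨P, h1, h2, h3⟩
    refine ⟨P, h1, h2, ?_⟩
    omega

-- ---------- the greedy check (A) characterised by partitions ----------

theorem checkGo_true_imp {T K acc : Int} {gap : List Int}
    (h : checkGo T K acc gap = true) : 1 ≤ K := by
  induction gap generalizing K acc with
  | nil => simpa [checkGo] using h
  | cons g rest ih =>
    simp only [checkGo] at h
    split_ifs at h with h1 h2
    · exact ih h
    · have := ih h
      omega

-- greedy never breaks inside a block that still fits entirely
theorem checkGo_consume {T : Int} (p : List Int) :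
    ∀ (rest : List Int) (K acc : Int), (∀ g ∈ p, 0 ≤ g) → acc + p.sum ≤ T →
    checkGo T K acc (p ++ rest) = checkGo T K (acc + p.sum) rest := by
  induction p with
  | nil => intro rest K acc _ _; simp
  | cons g p ih =>
    intro rest K acc hpos hsum
    have hg : 0 ≤ g := hpos g (by simp)
    have hps : 0 ≤ p.sum := List.sum_nonneg (fun x hx => hpos x (by simp [hx]))
    have hfit : acc + g ≤ T := by simp [List.sum_cons] at hsum; omega
    simp only [List.cons_append, checkGo, if_pos hfit]
    rw [ih rest K (acc + g) (fun x hx => hpos x (by simp [hx])) (by simp [List.sum_cons] at hsum ⊢; omega)]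
    simp [List.sum_cons]
    ring_nf

-- greedy crosses one whole block using at most one extra segment
theorem checkGo_block {T : Int} (p : List Int) :
    ∀ (rest : List Int) (K acc : Int), (∀ g ∈ p, 1 ≤ g) → 0 ≤ acc → acc ≤ T → p.sum ≤ T →
    ∃ acc' K', checkGo T K acc (p ++ rest) = checkGo T K' acc' rest ∧
      0 ≤ acc' ∧ acc' ≤ T ∧ K - 1 ≤ K' ∧ K' ≤ K := by
  induction p with
  | nil => intro rest K acc _ h0 hT _; exact ⟨acc, K, by simp, h0, hT, by omega, le_refl _⟩
  | cons g p ih =>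
    intro rest K acc hpos h0 hT hsum
    have hg : 1 ≤ g := hpos g (by simp)
    have hps : 0 ≤ p.sum := List.sum_nonneg (fun x hx => le_trans (by norm_num) (hpos x (by simp [hx])))
    by_cases hfit : acc + g ≤ T
    · obtain ⟨acc', K', heq, h1, h2, h3, h4⟩ :=
        ih rest K (acc + g) (fun x hx => hpos x (by simp [hx])) (by omega)
          (by omega) (by simp [List.sum_cons] at hsum; omega)
      exact ⟨acc', K', by simpa only [List.cons_append, checkGo, if_pos hfit] using heq, h1, h2, h3, h4⟩
    · have hgT : ¬ T < g := by simp [List.sum_cons] at hsum; omega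
      refine ⟨g + p.sum, K - 1, ?_, by omega, by simpa [List.sum_cons] using hsum, by omega, by omega⟩
      simp only [List.cons_append, checkGo, if_neg hfit, if_neg hgT]
      rw [checkGo_consume p rest (K - 1) g
        (fun x hx => le_trans (by norm_num) (hpos x (List.mem_cons_of_mem g hx))) (by simpa [List.sum_cons] using hsum)]

-- soundness: a successful greedy run yields a partition
theorem checkGo_sound {T : Int} (gap : List Int) :
    ∀ (K acc : Int), (∀ g ∈ gap, 1 ≤ g) → 0 ≤ acc → acc ≤ T → checkGo T K acc gap = true →
    ∃ q P, gap = q ++ P.flatten ∧ acc + q.sum ≤ T ∧ PartOK T P ∧ (P.length : Int) ≤ K - 1 := by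
  induction gap with
  | nil =>
    intro K acc _ h0 hT h
    have hk : 1 ≤ K := by simpa [checkGo] using h
    exact ⟨[], [], by simp, by simpa using hT, fun p hp => absurd hp (by simp), by simp; omega⟩
  | cons g rest ih =>
    intro K acc hpos h0 hT h
    have hg : 1 ≤ g := hpos g (by simp)
    have hrest : ∀ x ∈ rest, 1 ≤ x := fun x hx => hpos x (List.mem_cons_of_mem g hx)
    simp only [checkGo] at h
    split_ifs at h with h1 h2
    · obtain ⟨q, P, he, hs, hP, hl⟩ := ih K (acc + g) hrest (by omega) h1 h
      exact ⟨g :: q, P, by simp [he], by simp only [List.sum_cons]; omega, hP, hl⟩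
    · obtain ⟨q, P, he, hs, hP, hl⟩ := ih (K - 1) g hrest (by omega) (by omega) h
      refine ⟨[], (g :: q) :: P, by simp [he], by simpa using hT, ?_, ?_⟩
      · intro p hp
        rcases List.mem_cons.mp hp with hp | hp
        · subst hp; exact ⟨by simp, by simp only [List.sum_cons]; omega⟩
        · exact hP p hp
      · simp only [List.length_cons]; push_cast; omega

-- completeness: any partition is matched by the greedy run
theorem checkGo_complete {T : Int} (P : List (List Int)) :
    ∀ (K acc : Int), (∀ p ∈ P, p ≠ [] ∧ p.sum ≤ T ∧ ∀ g ∈ p, 1 ≤ g) →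
    0 ≤ acc → acc ≤ T → (P.length : Int) ≤ K - 1 →
    checkGo T K acc P.flatten = true := by
  induction P with
  | nil =>
    intro K acc _ _ _ hl
    simp only [List.flatten_nil, checkGo]
    simp at hl ⊢; omega
  | cons p P ih =>
    intro K acc hok h0 hT hl
    have hp := hok p (by simp)
    obtain ⟨acc', K', heq, h0', hT', hK1, hK2⟩ :=
      checkGo_block p P.flatten K acc hp.2.2 h0 hT hp.2.1
    rw [List.flatten_cons, heq]
    refine ih K' acc' (fun q hq => hok q (by simp [hq])) h0' hT' ?_
    simp only [List.length_cons] at hl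
    push_cast at hl ⊢; omega

theorem checkA_iff_Feas {T K : Int} {gap : List Int} (hK : 1 ≤ K)
    (hpos : ∀ g ∈ gap, 1 ≤ g) : checkA T K gap = true ↔ Feas T K gap := by
  constructor
  · intro h
    by_cases hT : 0 ≤ T
    · obtain ⟨q, P, he, hs, hP, hl⟩ := checkGo_sound gap K 0 hpos (le_refl 0) hT h
      by_cases hq : q = []
      · subst hq; exact ⟨P, by simp [he], hP, by omega⟩
      · refine ⟨q :: P, by simp [he], ?_, by simp; omega⟩
        intro p hp
        rcases List.mem_cons.mp hp with hp | hp
        · subst hp; exact ⟨hq, by simpa using hs⟩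
        · exact hP p hp
    · -- T < 0: the greedy cannot even start unless gap = []
      cases gap with
      | nil => exact ⟨[], by simp, fun p hp => absurd hp (by simp), by simp; omega⟩
      | cons g rest =>
        exfalso
        have hg : 1 ≤ g := hpos g (by simp)
        simp only [checkA, checkGo, if_neg (by omega : ¬ (0 + g ≤ T)), if_pos (by omega : T < g)] at h
        exact absurd h (by simp)
  · rintro ⟨P, h1, h2, h3⟩
    cases P with
    | nil => simp only [List.flatten_nil] at h1; subst h1; simp [checkA, checkGo]; omega
    | cons p P' =>
      have hp := h2 p (by simp)
      have hppos : ∀ g ∈ p, 1 ≤ g := fun g hg => hpos g (by rw [← h1]; exact List.mem_flatten.mpr ⟨p, by simp, hg⟩)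
      have hsum0 : 0 ≤ p.sum :=
        List.sum_nonneg (fun x hx => le_trans (by norm_num) (hppos x hx))
      rw [← h1]
      simp only [checkA, List.flatten_cons]
      rw [checkGo_consume p P'.flatten K 0 (fun x hx => le_trans (by norm_num) (hppos x hx)) (by omega)]
      refine checkGo_complete P' K (0 + p.sum) ?_ (by omega) (by omega) ?_
      · intro q hq
        refine ⟨(h2 q (by simp [hq])).1, (h2 q (by simp [hq])).2, ?_⟩
        intro g hg
        exact hpos g (by rw [← h1]; exact List.mem_flatten.mpr ⟨q, by simp [hq], hg⟩)
      · simp only [List.length_cons] at h3; push_cast at h3 ⊢; omega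

-- ---------- the gap construction ----------

theorem gap_inv (A' : List Int) : ∀ (k : Nat) (st : List Int × Int),
    ((List.range k).map (fun j : Nat => ((1:Int) + (j:Int)))).foldl (gapStep A') ([], 0) = st →
    st.1.sum = st.2 ∧ 0 ≤ st.2 ∧ st.2 ≤ (k : Int) ∧ ∀ g ∈ st.1, 1 ≤ g := by
  intro k
  induction k with
  | zero => intro st h; simp at h; subst h; simp
  | succ k ih =>
    intro st h
    rw [List.range_succ, List.map_append, List.foldl_append] at h
    obtain ⟨i1, i2, i3, i4⟩ := ih _ rfl
    simp only [List.map_cons, List.map_nil, List.foldl_cons, List.foldl_nil, gapStep] at h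
    split_ifs at h with hif
    · subst h
      refine ⟨by simp [List.sum_append]; omega, by simp; omega, by simp; omega, ?_⟩
      intro g hg
      rcases List.mem_append.mp hg with hg | hg
      · exact i4 g hg
      · simp at hg; omega
    · subst h
      exact ⟨i1, i2, by push_cast; omega, i4⟩

theorem gapsOf_eq_nil {N : Int} (A : List Int) (h : N ≤ 1) : gapsOf N A = [] := by
  unfold gapsOf
  rw [PySem.List.pyRange_one_eq_nil (by omega)]
  rfl

theorem gapsOf_spec {N : Int} {A : List Int} (h2 : 2 ≤ N) (hlen : N - 1 < (A.length : Int)) :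
    (gapsOf N A).sum = N - 1 ∧ gapsOf N A ≠ [] ∧ ∀ g ∈ gapsOf N A, 1 ≤ g := by
  unfold gapsOf
  have hget : PySem.List.pyGetD (PySem.List.pySetD A (N - 1) 1) (N - 1) 0 = 1 := by
    rw [PySem.List.pySetD_of_nonneg A 1 (by omega)]
    rw [PySem.List.pyGetD_eq_getElem _ 0 (by omega) (by simp; omega)]
    exact List.getElem_set_self (by simp; omega)
  rw [PySem.List.pyRange_one]
  obtain ⟨m, hm⟩ : ∃ m, (N - 1 - 1).toNat = m := ⟨_, rfl⟩
  have hmn : (N - 1).toNat = m + 1 := by omega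
  rw [hmn, List.range_succ, List.map_append, List.foldl_append]
  obtain ⟨i1, i2, i3, i4⟩ := gap_inv (PySem.List.pySetD A (N - 1) 1) m _ rfl
  set st := ((List.range m).map (fun j : Nat => ((1:Int) + (j:Int)))).foldl
    (gapStep (PySem.List.pySetD A (N - 1) 1)) ([], 0) with hst
  have hcast : (1 : Int) + (m : Int) = N - 1 := by omega
  simp only [List.map_cons, List.map_nil, List.foldl_cons, List.foldl_nil, gapStep, hcast, hget]
  simp only [BEq.rfl, if_true]
  refine ⟨by simp [List.sum_append]; omega, by simp, ?_⟩
  intro g hg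
  rcases List.mem_append.mp hg with hg | hg
  · exact i4 g hg
  · simp at hg; omega

-- ---------- prefix sums and the DP table, in closed form ----------

def Spre (gap : List Int) : List Int :=
  (List.range (gap.length + 1)).map (fun j => (gap.take j).sum)

def dp0v (gap : List Int) : List Int :=
  (List.range gap.length).map (fun j => (gap.take (j+1)).sum)

theorem preFold : ∀ (l q : List Int) (c : Int),
    l.foldl (fun p g => p ++ [PySem.List.pyGetD p (-1) 0 + g]) (q ++ [c])
      = q ++ [c] ++ (List.range l.length).map (fun j => c + (l.take (j+1)).sum) := by
  intro l
  induction l with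
  | nil => intro q c; simp
  | cons g l ih =>
    intro q c
    simp only [List.foldl_cons, PySem.List.pyGetD_neg_one_append_singleton]
    rw [ih (q ++ [c]) (c + g)]
    simp only [List.length_cons, List.range_succ_eq_map, List.map_cons, List.map_map]
    simp only [List.take_succ_cons, List.sum_cons, List.take_zero, List.sum_nil, add_zero]
    rw [List.map_congr_left (l := List.range l.length)
      (f := (fun j => c + (g + (List.take j l).sum)) ∘ Nat.succ)
      (g := fun j => c + g + (l.take (j+1)).sum)
      (by intro a _; simp [Nat.succ_eq_add_one]; ring)]
    simp [List.append_assoc]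

theorem pre_eq (gap : List Int) :
    gap.foldl (fun p g => p ++ [PySem.List.pyGetD p (-1) 0 + g]) [0] = Spre gap := by
  have h := preFold gap [] 0
  simp only [List.nil_append] at h
  rw [h]
  unfold Spre
  rw [List.range_succ_eq_map, List.map_cons, List.map_map]
  simp only [List.take_zero, List.sum_nil]
  rw [List.map_congr_left (f := fun j => (0:Int) + (gap.take (j+1)).sum)
    (g := fun j => (List.take (Nat.succ j) gap).sum) (by intro a _; simp [Nat.succ_eq_add_one])]
  rfl

theorem dp0_eq (gap : List Int) : PySem.List.slice (Spre gap) (some 1) none = dp0v gap := by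
  rw [PySem.List.slice_from_one]
  unfold Spre dp0v
  rw [List.range_succ_eq_map, List.map_cons, List.tail_cons, List.map_map]
  exact List.map_congr_left (by intro a _; simp [Nat.succ_eq_add_one])

theorem Spre_getD (gap : List Int) (j : Nat) (hj : j ≤ gap.length) :
    (Spre gap).getD j 0 = (gap.take j).sum :=
  PySem.List.getD_map_range _ _ _ _ (by omega)

-- candidate value for a split after position t, and the inner min-loop of one DP row
def candv (gap dp : List Int) (j t : Nat) : Int :=
  max (dp.getD t 0) ((gap.take (j+1)).sum - (gap.take (t+1)).sum)

def innerv (gap dp : List Int) (j : Nat) : Int :=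
  (List.range j).foldl (fun best t => min best (candv gap dp j t)) (dp.getD j 0)

theorem layer_eq (dp gap : List Int) :
    layerB dp gap (Spre gap) = (List.range gap.length).map (innerv gap dp) := by
  unfold layerB
  rw [PySem.List.foldl_append_singleton_eq_map, PySem.List.pyRange_zero_natCast, List.map_map]
  simp only [List.nil_append]
  apply List.map_congr_left
  intro j hj
  have hjm : j < gap.length := List.mem_range.mp hj
  unfold innerv
  simp only [Function.comp_apply]
  rw [PySem.List.pyRange_zero_natCast, List.foldl_map]
  rw [PySem.List.pyGetD_natCast]
  apply PySem.List.foldl_congr_mem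
  intro best t ht
  have htj : t < j := List.mem_range.mp ht
  have h1 : ((t : Int) + 1) = ((t + 1 : Nat) : Int) := by push_cast; ring
  have h2 : ((j : Int) + 1) = ((j + 1 : Nat) : Int) := by push_cast; ring
  rw [h1, h2, PySem.List.pyGetD_natCast, PySem.List.pyGetD_natCast, PySem.List.pyGetD_natCast]
  rw [Spre_getD gap (j+1) (by omega), Spre_getD gap (t+1) (by omega)]
  unfold candv
  split_ifs with h <;> omega

theorem foldl_min_spec {ι : Type} (l : List ι) (f : ι → Int) : ∀ (a r : Int),
    l.foldl (fun best x => min best (f x)) a = r →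
    (r = a ∨ ∃ x ∈ l, r = f x) ∧ r ≤ a ∧ ∀ x ∈ l, r ≤ f x := by
  induction l with
  | nil => intro a r h; simp at h; subst h; exact ⟨Or.inl rfl, le_refl _, by simp⟩
  | cons x l ih =>
    intro a r h
    simp only [List.foldl_cons] at h
    obtain ⟨hmem, hle, hall⟩ := ih (min a (f x)) r h
    refine ⟨?_, le_trans hle (min_le_left _ _), ?_⟩
    · rcases hmem with h' | ⟨y, hy, h'⟩
      · rcases le_total a (f x) with hc | hc
        · exact Or.inl (by rw [h', min_eq_left hc])
        · exact Or.inr ⟨x, by simp, by rw [h', min_eq_right hc]⟩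
      · exact Or.inr ⟨y, List.mem_cons_of_mem x hy, h'⟩
    · intro y hy
      rcases List.mem_cons.mp hy with hy | hy
      · subst hy; exact le_trans hle (min_le_right _ _)
      · exact hall y hy

theorem foldl_const_iterate {α β : Type} (l : List α) (F : β → β) (b : β) :
    l.foldl (fun acc _ => F acc) b = F^[l.length] b := by
  induction l generalizing b with
  | nil => rfl
  | cons x l ih => simp only [List.foldl_cons, List.length_cons, ih,
      Function.iterate_succ_apply]

-- ---------- the DP invariant: each row is the exact minimax optimum ----------

def dpInv (gap : List Int) (s : Nat) (dp : List Int) : Prop :=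
  dp.length = gap.length ∧ ∀ j : Nat, j < gap.length →
    FeasN (dp.getD j 0) s (gap.take (j+1)) ∧
    ∀ T, FeasN T s (gap.take (j+1)) → dp.getD j 0 ≤ T

theorem dpInv_base (gap : List Int) : dpInv gap 1 (dp0v gap) := by
  refine ⟨by simp [dp0v], ?_⟩
  intro j hj
  have hget : (dp0v gap).getD j 0 = (gap.take (j+1)).sum :=
    PySem.List.getD_map_range _ _ _ _ hj
  have htl : (gap.take (j+1)).length = j + 1 := by
    rw [List.length_take]
    omega
  have htn : gap.take (j+1) ≠ [] := by
    intro h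
    rw [h] at htl
    simp at htl
  rw [hget]
  constructor
  · exact ⟨[gap.take (j+1)], by simp, fun p hp => by simp at hp; subst hp; exact ⟨htn, le_refl _⟩, by simp⟩
  · rintro T ⟨P, h1, h2, h3⟩
    match P, h3 with
    | [], _ =>
      exfalso
      exact htn (by simpa using h1.symm)
    | [p], _ =>
      simp only [List.flatten_cons, List.flatten_nil, List.append_nil] at h1
      rw [← h1]
      exact (h2 p (by simp)).2

theorem dpInv_step (gap dp : List Int) (s : Nat) (hs : 1 ≤ s)
    (h : dpInv gap s dp) : dpInv gap (s+1) (layerB dp gap (Spre gap)) := by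
  obtain ⟨hlen, hinv⟩ := h
  rw [layer_eq dp gap]
  refine ⟨by simp, ?_⟩
  intro j hj
  rw [PySem.List.getD_map_range _ _ _ _ hj]
  obtain ⟨hmem, hle, hall⟩ := foldl_min_spec (List.range j) (candv gap dp j) (dp.getD j 0)
    (innerv gap dp j) rfl
  constructor
  · -- achievability
    rcases hmem with hr | ⟨t, ht, hr⟩
    · exact FeasN_mono_s (by omega) (hr ▸ (hinv j hj).1)
    · have htj : t < j := List.mem_range.mp ht
      obtain ⟨P, p1, p2, p3⟩ := (hinv t (by omega)).1
      have hsplit : gap.take (j+1) = gap.take (t+1) ++ (gap.take (j+1)).drop (t+1) := by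
        conv_lhs => rw [← List.take_append_drop (t+1) (gap.take (j+1))]
        rw [List.take_take, min_eq_left (by omega)]
      have hqlen : ((gap.take (j+1)).drop (t+1)).length = j - t := by
        simp only [List.length_drop, List.length_take]
        omega
      have hqne : (gap.take (j+1)).drop (t+1) ≠ [] := by
        intro hq
        rw [hq] at hqlen
        simp at hqlen
        omega
      have hqsum : ((gap.take (j+1)).drop (t+1)).sum
          = (gap.take (j+1)).sum - (gap.take (t+1)).sum := by
        have := congrArg List.sum hsplit
        rw [List.sum_append] at this
        omega
      refine ⟨P ++ [(gap.take (j+1)).drop (t+1)], ?_, ?_, ?_⟩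
      · rw [List.flatten_append, p1]
        simp [hsplit.symm]
      · intro p hp
        rcases List.mem_append.mp hp with hp | hp
        · refine ⟨(p2 p hp).1, le_trans (p2 p hp).2 ?_⟩
          rw [hr]; exact le_trans (le_max_left _ _) (le_refl _)
        · simp at hp; subst hp
          refine ⟨hqne, ?_⟩
          rw [hqsum, hr]
          exact le_max_right _ _
      · simp only [List.length_append, List.length_cons, List.length_nil]
        omega
  · -- optimality
    rintro T ⟨P, p1, p2, p3⟩
    by_cases hPs : P.length ≤ s
    · exact le_trans hle ((hinv j hj).2 T ⟨P, p1, p2, hPs⟩)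
    · have hPlen : P.length = s + 1 := by omega
      have hPne : P ≠ [] := by intro h'; rw [h'] at hPlen; simp at hPlen
      have hqmem : P.getLast hPne ∈ P := List.getLast_mem _
      have hqne : P.getLast hPne ≠ [] := (p2 _ hqmem).1
      have hPsplit : P.dropLast ++ [P.getLast hPne] = P := List.dropLast_append_getLast hPne
      have hflat : P.dropLast.flatten ++ P.getLast hPne = gap.take (j+1) := by
        rw [← p1]
        conv_rhs => rw [← hPsplit]
        simp [List.flatten_append]
      have hflen : (gap.take (j+1)).length = j + 1 := by
        simp [List.length_take]; omega
      have hdlen : P.dropLast.length = s := by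
        rw [List.length_dropLast, hPlen]; rfl
      have hdne : P.dropLast ≠ [] := by
        intro h'
        rw [h'] at hdlen
        simp at hdlen
        omega
      have hflne : P.dropLast.flatten ≠ [] := by
        obtain ⟨p0, hp0⟩ := List.exists_mem_of_ne_nil _ hdne
        have hp0P : p0 ∈ P := (List.dropLast_sublist P).subset hp0
        have : p0 ≠ [] := (p2 p0 hp0P).1
        obtain ⟨x, hx⟩ := List.exists_mem_of_ne_nil _ this
        intro hcon
        exact absurd (List.mem_flatten.mpr ⟨p0, hp0, hx⟩) (by rw [hcon]; simp)
      have hql : 1 ≤ (P.getLast hPne).length := List.length_pos_iff.mpr hqne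
      have hal : 1 ≤ P.dropLast.flatten.length := List.length_pos_iff.mpr hflne
      have hlensum : P.dropLast.flatten.length + (P.getLast hPne).length = j + 1 := by
        have := congrArg List.length hflat
        simpa [List.length_append, hflen] using this
      obtain ⟨t, hta⟩ : ∃ t, P.dropLast.flatten.length = t + 1 :=
        ⟨P.dropLast.flatten.length - 1, by omega⟩
      have htj : t < j := by omega
      have hPd : P.dropLast.flatten = gap.take (t+1) := by
        have h1 : P.dropLast.flatten = (gap.take (j+1)).take (t+1) := by
          rw [← hflat, ← hta, List.take_left]
        rw [h1, List.take_take, min_eq_left (by omega)]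
      have hdpt : dp.getD t 0 ≤ T := by
        refine (hinv t (by omega)).2 T ⟨P.dropLast, hPd, ?_, by omega⟩
        exact fun p hp => p2 p ((List.dropLast_sublist P).subset hp)
      have hqsumT : (gap.take (j+1)).sum - (gap.take (t+1)).sum ≤ T := by
        have hsums := congrArg List.sum hflat
        rw [List.sum_append, hPd] at hsums
        have := (p2 _ hqmem).2
        omega
      have hct : candv gap dp j t ≤ T := max_le hdpt hqsumT
      exact le_trans (hall t (List.mem_range.mpr htj)) hct

theorem dpInv_iter (gap : List Int) (n : Nat) :
    dpInv gap (n+1) ((fun dp => layerB dp gap (Spre gap))^[n] (dp0v gap)) := by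
  induction n with
  | zero => exact dpInv_base gap
  | succ n ih =>
    rw [Function.iterate_succ_apply']
    exact dpInv_step _ _ _ (by omega) ih

-- ---------- the binary search returns the least feasible T ----------

theorem bsA_false {K : Int} {gap : List Int} (hfalse : ∀ T, checkA T K gap = false) :
    ∀ (n : Nat) (s e : Int), (e - s).toNat ≤ n → s ≤ e → bsA K gap s e = e := by
  intro n
  induction n with
  | zero => intro s e h1 h2; rw [bsA, dif_neg (by omega)]; omega
  | succ n ih =>
    intro s e h1 h2
    rw [bsA]
    by_cases hlt : s < e
    · rw [dif_pos hlt, if_pos (hfalse _)]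
      have hb := PySem.Int.floordiv_mul_add_mod (s + e) 2
      have hb2 := PySem.Int.mod_nonneg (s + e) (b := 2) (by omega)
      have hb3 := PySem.Int.mod_lt (s + e) (b := 2) (by omega)
      exact ih _ e (by omega) (by omega)
    · rw [dif_neg hlt]; omega

theorem bsA_exact {K d : Int} {gap : List Int}
    (hiff : ∀ T, checkA T K gap = true ↔ d ≤ T) :
    ∀ (n : Nat) (s e : Int), (e - s).toNat ≤ n → s ≤ d → d ≤ e → bsA K gap s e = d := by
  intro n
  induction n with
  | zero => intro s e h1 h2 h3; rw [bsA, dif_neg (by omega)]; omega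
  | succ n ih =>
    intro s e h1 h2 h3
    rw [bsA]
    by_cases hlt : s < e
    · rw [dif_pos hlt]
      have hb := PySem.Int.floordiv_mul_add_mod (s + e) 2
      have hb2 := PySem.Int.mod_nonneg (s + e) (b := 2) (by omega)
      have hb3 := PySem.Int.mod_lt (s + e) (b := 2) (by omega)
      by_cases hc : checkA (PySem.Int.floordiv (s + e) 2) K gap = false
      · rw [if_pos hc]
        have hnd : ¬ d ≤ PySem.Int.floordiv (s + e) 2 := by
          intro hdm
          rw [(hiff _).mpr hdm] at hc
          exact absurd hc (by simp)
        exact ih _ e (by omega) (by omega) h3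
      · rw [if_neg hc]
        have hd : d ≤ PySem.Int.floordiv (s + e) 2 := by
          refine (hiff _).mp ?_
          revert hc
          cases checkA (PySem.Int.floordiv (s + e) 2) K gap <;> simp
        exact ih s _ (by omega) h2 hd
    · rw [dif_neg hlt]; omega

-- ---------- assembling the two programs ----------

theorem checkA_false_of_K_nonpos {T K : Int} {gap : List Int} (hK : K ≤ 0) :
    checkA T K gap = false := by
  cases h : checkA T K gap
  · rfl
  · exact absurd (checkGo_true_imp h) (by omega)

theorem pyGetD_last_getD (l : List Int) (m : Nat) (hlen : l.length = m) (hm : 1 ≤ m) :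
    PySem.List.pyGetD l (-1) 0 = l.getD (m-1) 0 := by
  have hne : l ≠ [] := by intro h; rw [h] at hlen; simp at hlen; omega
  rw [PySem.List.pyGetD_neg_one _ _ hne, List.getLast_eq_getElem,
    List.getD_eq_getElem _ _ (by omega)]
  congr 1
  omega

theorem dp0v_last (gap : List Int) (hne : gap ≠ []) :
    PySem.List.pyGetD (dp0v gap) (-1) 0 = gap.sum := by
  obtain ⟨m', hm'⟩ : ∃ m', gap.length = m' + 1 :=
    ⟨gap.length - 1, by have := List.length_pos_iff.mpr hne; omega⟩
  unfold dp0v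
  rw [hm', List.range_succ, List.map_append, List.map_cons, List.map_nil,
    PySem.List.pyGetD_neg_one_append_singleton, ← hm', List.take_length]

theorem solve_alt_eval (N K : Int) (A : List Int) (hne : gapsOf N A ≠ []) :
    solve_alt N K A = PySem.List.pyGetD
      ((fun dp => layerB dp (gapsOf N A) (Spre (gapsOf N A)))^[(min K ((gapsOf N A).length : Int) - 1).toNat]
        (dp0v (gapsOf N A))) (-1) 0 := by
  unfold solve_alt
  simp only [if_neg hne, pre_eq, dp0_eq]
  rw [foldl_const_iterate, PySem.List.length_pyRange_one]

-- the DP result is the least T for which A's greedy check succeeds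
theorem dp_answer_spec (gap : List Int) (K : Int) (hK : 1 ≤ K) (hne : gap ≠ [])
    (hpos : ∀ g ∈ gap, 1 ≤ g) (d : Int)
    (hd : ((fun dp => layerB dp gap (Spre gap))^[(min K (gap.length : Int) - 1).toNat]
      (dp0v gap)).getD (gap.length - 1) 0 = d) :
    (∀ T, checkA T K gap = true ↔ d ≤ T) ∧ 0 ≤ d ∧ d ≤ gap.sum := by
  have hm1 : 1 ≤ gap.length := List.length_pos_iff.mpr hne
  have hc1 : 1 ≤ min K (gap.length : Int) := by omega
  have hct : (min K (gap.length : Int) - 1).toNat + 1 = (min K (gap.length : Int)).toNat := by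
    omega
  have hinv := dpInv_iter gap ((min K (gap.length : Int) - 1).toNat)
  rw [hct] at hinv
  obtain ⟨hlenF, hjs⟩ := hinv
  have htake : gap.take ((gap.length - 1) + 1) = gap := by
    rw [show gap.length - 1 + 1 = gap.length from by omega]
    exact List.take_length
  have hach : FeasN d (min K (gap.length : Int)).toNat gap := by
    have := (hjs (gap.length - 1) (by omega)).1
    rwa [htake, hd] at this
  have hopt : ∀ T, FeasN T (min K (gap.length : Int)).toNat gap → d ≤ T := by
    intro T hT
    have := (hjs (gap.length - 1) (by omega)).2 T (by rwa [htake])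
    rwa [hd] at this
  have hiff : ∀ T, checkA T K gap = true ↔ d ≤ T := by
    intro T
    rw [checkA_iff_Feas hK hpos, Feas_iff_FeasN hK]
    exact ⟨hopt T, fun hdT => FeasN_mono_val hdT hach⟩
  refine ⟨hiff, ?_, ?_⟩
  · obtain ⟨P, p1, p2, p3⟩ := hach
    cases P with
    | nil => exact absurd p1.symm (by simpa using hne)
    | cons p P' =>
      have hp := p2 p (by simp)
      have hppos : 0 < p.sum := by
        refine List.sum_pos p (fun x hx => ?_) hp.1
        have : x ∈ gap := by
          rw [← p1]; exact List.mem_flatten.mpr ⟨p, by simp, hx⟩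
        have := hpos x this
        omega
      have := hp.2
      omega
  · refine hopt gap.sum ((Feas_iff_FeasN (l := gap) hK).mp ⟨[gap], by simp, ?_, by simp; omega⟩)
    intro p hp
    simp at hp
    subst hp
    exact ⟨hne, le_refl _⟩

theorem solve_eq (N K : Int) (A : List Int) (hpre : Pre_solve N K A) :
    solve N K A = solve_alt N K A := by
  have hpre' : -(A.length : Int) ≤ N - 1 ∧ N - 1 < (A.length : Int) := by
    have h := hpre
    unfold Pre_solve at h
    simpa [PySem.Raise.InRange] using h
  by_cases hN : N ≤ 1
  · have hg : gapsOf N A = [] := gapsOf_eq_nil A hN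
    unfold solve solve_alt
    rw [hg, bsA, dif_neg (by omega)]
    simp
  · have hN2 : 2 ≤ N := by omega
    obtain ⟨hsum, hne, hpos⟩ := gapsOf_spec hN2 hpre'.2
    have hm1 : 1 ≤ (gapsOf N A).length := List.length_pos_iff.mpr hne
    by_cases hK : 1 ≤ K
    · -- the generic case: both sides compute the least feasible T
      obtain ⟨hiff, hd0, hdN⟩ := dp_answer_spec (gapsOf N A) K hK hne hpos _ rfl
      rw [hsum] at hdN
      have hB : solve_alt N K A = ((fun dp => layerB dp (gapsOf N A) (Spre (gapsOf N A)))^[(min K ((gapsOf N A).length : Int) - 1).toNat]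
          (dp0v (gapsOf N A))).getD ((gapsOf N A).length - 1) 0 := by
        rw [solve_alt_eval N K A hne]
        refine pyGetD_last_getD _ (gapsOf N A).length ?_ hm1
        exact (dpInv_iter (gapsOf N A) _).1
      rw [hB]
      unfold solve
      exact bsA_exact hiff (N - 1 - 0).toNat 0 (N - 1) (by omega) hd0 hdN
    · -- K < 1: the check never succeeds, A's search collapses to N-1 = sum of gaps,
      -- which is exactly B's one-segment base row
      have hfalse : ∀ T, checkA T K (gapsOf N A) = false :=
        fun T => checkA_false_of_K_nonpos (by omega)
      have hA : solve N K A = N - 1 := by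
        unfold solve
        exact bsA_false hfalse (N - 1 - 0).toNat 0 (N - 1) (by omega) (by omega)
      have hB : solve_alt N K A = N - 1 := by
        rw [solve_alt_eval N K A hne]
        rw [show (min K ((gapsOf N A).length : Int) - 1).toNat = 0 from by omega]
        rw [Function.iterate_zero_apply]
        rw [dp0v_last _ hne, hsum]
      rw [hA, hB]

-- ===== VERDICT (by name: the statement is the Claim_ definition above) =====
theorem solve_spec : Claim_equal_solve := by
  intro N K A _ hpre
  unfold Spec_solve
  exact solve_eq N K A hpre
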